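-- pv_equiv track=rewrite | github.com/rdcmji/coding-test | perfect_crime.py | answer
-- ===== SOURCE A (Python) =====
-- def answer(info, catch_a, catch_b):
--     dp = {0:0}
--     for a,b in info:
--         ndp = {}
--         for k,v in dp.items():
--             if a+k < catch_a:
--                 ndp[a+k] = min(ndp.get(a+k,v),v)
--             if b+v < catch_b:
--                 ndp[k] = min(ndp.get(k,b+v),b+v)
--         dp=ndp
--     if dp:
--         return min(dp)
--     return -1
-- ===== SOURCE B (Python) =====
-- def answer(info, catch_a, catch_b):
--     # Pareto-frontier DP: keep a list of non-dominated (A-sum, B-sum) states,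
--     # pruned each round by sorting on A-sum and keeping strictly improving B-sums.
--     front = [(0, 0)]
--     for a, b in info:
--         cand = []
--         for sa, sb in front:
--             if sa + a < catch_a:
--                 cand.append((sa + a, sb))
--             if sb + b < catch_b:
--                 cand.append((sa, sb + b))
--         cand.sort(key=lambda s: s[0])
--         front = []
--         best = None
--         for sa, sb in cand:
--             if best is None or sb < best:
--                 front.append((sa, sb))
--                 best = sb
--     return min((sa for sa, sb in front), default=-1)
-- ===== Notes on version B (the rewrite author's own statement) =====
-- stated objective: faster
-- what changed: Replaces the dict DP (one entry per reachable A-sum holding its minimal B-sum, min over keys at the end) by a Pareto-frontier DP over (A-sum, B-sum) states: each round the candidate states are sorted by A-sum and one scan keeps only states whose B-sum strictly improves on everything kept before, and the minimal A-sum of the surviving frontier is returned.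
import Mathlib
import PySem

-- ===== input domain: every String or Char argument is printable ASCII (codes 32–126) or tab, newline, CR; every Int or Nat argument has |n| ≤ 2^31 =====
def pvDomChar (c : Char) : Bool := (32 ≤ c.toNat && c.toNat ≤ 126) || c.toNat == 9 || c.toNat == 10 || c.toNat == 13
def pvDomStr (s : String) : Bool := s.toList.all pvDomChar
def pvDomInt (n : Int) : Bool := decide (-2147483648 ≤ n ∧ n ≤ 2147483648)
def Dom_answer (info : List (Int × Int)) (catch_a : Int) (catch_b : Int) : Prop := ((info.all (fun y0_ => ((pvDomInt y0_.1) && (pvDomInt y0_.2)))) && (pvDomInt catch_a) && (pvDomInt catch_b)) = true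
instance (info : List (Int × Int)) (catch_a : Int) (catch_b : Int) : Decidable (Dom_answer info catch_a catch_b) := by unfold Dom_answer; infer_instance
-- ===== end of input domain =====

-- B replaces the dict DP (min B-sum kept per A-sum key, min over keys at the end) by a
-- Pareto-frontier DP: sort candidate states by A-sum, keep strictly improving B-sums (objective: alternative).


-- ===== PORT A =====
def answer (info : List (Int × Int)) (catch_a : Int) (catch_b : Int) : Int :=
  let dp : PySem.Dict Int Int :=
    info.foldl (fun dp p =>
      dp.items.foldl (fun ndp q =>
        let ndp := if p.1 + q.1 < catch_a then
            ndp.insert (p.1 + q.1) (min (ndp.getD (p.1 + q.1) q.2) q.2) else ndp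
        if p.2 + q.2 < catch_b then
            ndp.insert q.1 (min (ndp.getD q.1 (p.2 + q.2)) (p.2 + q.2)) else ndp)
        PySem.Dict.empty)
      (PySem.Dict.ofList [(0, 0)])
  if dp.size ≠ 0 then (PySem.List.min? dp.keys (fun x => x)).getD (-1) else -1

-- ===== PORT B =====
def answer_alt (info : List (Int × Int)) (catch_a : Int) (catch_b : Int) : Int :=
  let front : List (Int × Int) :=
    info.foldl (fun front p =>
      let cand := front.foldl (fun cand q =>
        let cand := if q.1 + p.1 < catch_a then cand ++ [(q.1 + p.1, q.2)] else cand
        if q.2 + p.2 < catch_b then cand ++ [(q.1, q.2 + p.2)] else cand) []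
      let cand := PySem.List.sorted cand (fun s => s.1)
      -- 'best = None; for sa, sb in cand: if best is None or sb < best: front.append((sa, sb)); best = sb'
      (cand.foldl (fun st s =>
          if (match st.2 with | none => true | some v => decide (s.2 < v)) = true
          then (st.1 ++ [s], some s.2) else st)
        (([] : List (Int × Int)), (none : Option Int))).1)
      [(0, 0)]
  (PySem.List.min? (front.map (fun s => s.1)) (fun x => x)).getD (-1)

-- ===== PRECONDITION & SPEC =====
def Spec_answer (info : List (Int × Int)) (catch_a : Int) (catch_b : Int) (out : Int) : Prop := out = answer_alt info catch_a catch_b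
instance (info : List (Int × Int)) (catch_a : Int) (catch_b : Int) (out : Int) : Decidable (Spec_answer info catch_a catch_b out) := by unfold Spec_answer; infer_instance

-- ===== CLAIM (what is proved, stated in full; the proofs are below) =====
def Claim_equal_answer : Prop := ∀ (info : List (Int × Int)) (catch_a : Int) (catch_b : Int), Dom_answer info catch_a catch_b → Spec_answer info catch_a catch_b (answer info catch_a catch_b)

-- ===== LEMMAS AND PROOFS =====

-- the (key, value) contributions of one dp entry / state q under item p
def pvContribs (ca cb : Int) (p q : Int × Int) : List (Int × Int) :=
  (if p.1 + q.1 < ca then [(p.1 + q.1, q.2)] else []) ++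
  (if p.2 + q.2 < cb then [(q.1, p.2 + q.2)] else [])

lemma mem_pvContribs {ca cb : Int} {p q x : Int × Int} :
    x ∈ pvContribs ca cb p q ↔
      (p.1 + q.1 < ca ∧ x = (p.1 + q.1, q.2)) ∨ (p.2 + q.2 < cb ∧ x = (q.1, p.2 + q.2)) := by
  unfold pvContribs; split_ifs <;> simp_all

-- min-accumulating dict step
def pvMStep (d : PySem.Dict Int Int) (q : Int × Int) : PySem.Dict Int Int :=
  d.insert q.1 (min (d.getD q.1 q.2) q.2)

-- minimum of a list presented as Python's min over a nonempty list
def pvMinL : List Int → Option Int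
  | [] => none
  | c :: cs => some (cs.foldl min c)

lemma pvFoldlMin_mem : ∀ (t : List Int) (c : Int), t.foldl min c ∈ c :: t := by
  intro t
  induction t with
  | nil => simp
  | cons d t ih =>
    intro c
    simp only [List.foldl]
    rcases List.mem_cons.1 (ih (min c d)) with h | h
    · rcases min_choice c d with hm | hm
      · exact List.mem_cons.2 (Or.inl (h.trans hm))
      · exact List.mem_cons.2 (Or.inr (List.mem_cons.2 (Or.inl (h.trans hm))))
    · exact List.mem_cons.2 (Or.inr (List.mem_cons.2 (Or.inr h)))

lemma pvFoldlMin_le : ∀ (t : List Int) (c : Int) (w : Int), w ∈ c :: t → t.foldl min c ≤ w := by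
  intro t
  induction t with
  | nil =>
    intro c w hw
    simp at hw
    simp [hw]
  | cons d t ih =>
    intro c w hw
    simp only [List.foldl]
    have hb : t.foldl min (min c d) ≤ min c d := ih (min c d) (min c d) (by simp)
    rcases List.mem_cons.1 hw with h1 | hw2
    · rw [h1]
      exact le_trans hb (min_le_left _ _)
    rcases List.mem_cons.1 hw2 with h2 | hw3
    · rw [h2]
      exact le_trans hb (min_le_right _ _)
    · exact ih _ _ (List.mem_cons_of_mem _ hw3)

lemma pvMinL_mem {xs : List Int} {μ : Int} (h : pvMinL xs = some μ) : μ ∈ xs := by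
  cases xs with
  | nil => simp [pvMinL] at h
  | cons c cs =>
    simp [pvMinL] at h
    rw [← h]
    exact pvFoldlMin_mem cs c

lemma pvMinL_le {xs : List Int} {μ : Int} (h : pvMinL xs = some μ) : ∀ w ∈ xs, μ ≤ w := by
  cases xs with
  | nil => simp [pvMinL] at h
  | cons c cs =>
    simp [pvMinL] at h
    intro w hw
    rw [← h]
    exact pvFoldlMin_le cs c w hw

lemma pvMinL_eq_none {xs : List Int} : pvMinL xs = none ↔ xs = [] := by
  cases xs <;> simp [pvMinL]

-- pvMinL depends only on membership
lemma pvMinL_congr {xs ys : List Int} (h : ∀ x, x ∈ xs ↔ x ∈ ys) : pvMinL xs = pvMinL ys := by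
  rcases hx : pvMinL xs with _ | μ <;> rcases hy : pvMinL ys with _ | ν
  · rfl
  · have hxe : xs = [] := pvMinL_eq_none.1 hx
    subst hxe
    exact absurd ((h ν).2 (pvMinL_mem hy)) (by simp)
  · have hye : ys = [] := pvMinL_eq_none.1 hy
    subst hye
    exact absurd ((h μ).1 (pvMinL_mem hx)) (by simp)
  · congr 1
    have h1 := pvMinL_le hy μ ((h μ).1 (pvMinL_mem hx))
    have h2 := pvMinL_le hx ν ((h ν).2 (pvMinL_mem hy))
    omega

-- B's scan step (the pruning loop body), named
def pvScanStep : (List (Int × Int) × Option Int) → (Int × Int) → (List (Int × Int) × Option Int) :=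
  fun st s =>
    if (match st.2 with | none => true | some v => decide (s.2 < v)) = true
    then (st.1 ++ [s], some s.2) else st

-- B's per-item step, named
def pvStepB (ca cb : Int) (front : List (Int × Int)) (p : Int × Int) : List (Int × Int) :=
  let cand := front.foldl (fun cand q =>
    let cand := if q.1 + p.1 < ca then cand ++ [(q.1 + p.1, q.2)] else cand
    if q.2 + p.2 < cb then cand ++ [(q.1, q.2 + p.2)] else cand) []
  let cand := PySem.List.sorted cand (fun s => s.1)
  (cand.foldl pvScanStep (([] : List (Int × Int)), (none : Option Int))).1

-- the layered state generator: all reachable states, as a plain list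
def pvGen (ca cb : Int) (l : List (Int × Int)) (S : List (Int × Int)) : List (Int × Int) :=
  l.foldl (fun S p => S.flatMap (pvContribs ca cb p)) S

lemma pvGen_cons (ca cb : Int) (p : Int × Int) (t : List (Int × Int)) (S : List (Int × Int)) :
    pvGen ca cb (p :: t) S = pvGen ca cb t (S.flatMap (pvContribs ca cb p)) := rfl

-- the scan keeps a subset of its (fst-sorted) input that dominates every input element
lemma pvScan_dom : ∀ (l : List (Int × Int)) (front : List (Int × Int)) (best : Option Int),
    l.Pairwise (fun x y => x.1 ≤ y.1) →
    (∀ v, best = some v → ∃ p ∈ front, p.2 ≤ v ∧ ∀ c ∈ l, p.1 ≤ c.1) →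
    (∀ p ∈ (l.foldl pvScanStep (front, best)).1, p ∈ front ∨ p ∈ l) ∧
    (∀ c ∈ l, ∃ p ∈ (l.foldl pvScanStep (front, best)).1, p.1 ≤ c.1 ∧ p.2 ≤ c.2) ∧
    (∀ p ∈ front, p ∈ (l.foldl pvScanStep (front, best)).1) := by
  intro l
  induction l with
  | nil =>
    intro front best _ _
    exact ⟨fun p hp => Or.inl hp, by simp, fun p hp => hp⟩
  | cons s t ih =>
    intro front best hpw hinv
    obtain ⟨hs, hpw'⟩ := List.pairwise_cons.1 hpw
    simp only [List.foldl]
    have hkeep : ∀ (front : List (Int × Int)),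
        (∀ v, (some s.2 : Option Int) = some v → ∃ p ∈ front ++ [s], p.2 ≤ v ∧ ∀ c ∈ t, p.1 ≤ c.1) →
        (∀ p ∈ (t.foldl pvScanStep (front ++ [s], some s.2)).1, p ∈ front ∨ p ∈ s :: t) ∧
        (∀ c ∈ s :: t, ∃ p ∈ (t.foldl pvScanStep (front ++ [s], some s.2)).1, p.1 ≤ c.1 ∧ p.2 ≤ c.2) ∧
        (∀ p ∈ front, p ∈ (t.foldl pvScanStep (front ++ [s], some s.2)).1) := by
      intro front hinv'
      obtain ⟨H1, H2, H3⟩ := ih (front ++ [s]) (some s.2) hpw' hinv'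
      refine ⟨?_, ?_, ?_⟩
      · intro p hp
        rcases H1 p hp with h | h
        · rcases List.mem_append.1 h with h | h
          · exact Or.inl h
          · simp at h
            exact Or.inr (h ▸ List.mem_cons_self ..)
        · exact Or.inr (List.mem_cons_of_mem _ h)
      · intro c hc
        rcases List.mem_cons.1 hc with rfl | hc'
        · exact ⟨c, H3 c (by simp), le_refl _, le_refl _⟩
        · exact H2 c hc'
      · intro p hp
        exact H3 p (List.mem_append_left _ hp)
    cases best with
    | none =>
      rw [show pvScanStep (front, (none : Option Int)) s = (front ++ [s], some s.2) from by
        simp [pvScanStep]]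
      exact hkeep front (by
        intro v hv
        cases hv
        exact ⟨s, by simp, le_refl _, hs⟩)
    | some v =>
      by_cases hvs : s.2 < v
      · rw [show pvScanStep (front, some v) s = (front ++ [s], some s.2) from by
          simp [pvScanStep, hvs]]
        exact hkeep front (by
          intro w hw
          cases hw
          exact ⟨s, by simp, le_refl _, hs⟩)
      · rw [show pvScanStep (front, some v) s = (front, some v) from by
          simp [pvScanStep, hvs]]
        obtain ⟨p0, hp0f, hp0v, hp0l⟩ := hinv v rfl
        have hinv' : ∀ w, (some v : Option Int) = some w →
            ∃ p ∈ front, p.2 ≤ w ∧ ∀ c ∈ t, p.1 ≤ c.1 := by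
          intro w hw
          cases hw
          exact ⟨p0, hp0f, hp0v, fun c hc => hp0l c (List.mem_cons_of_mem _ hc)⟩
        obtain ⟨H1, H2, H3⟩ := ih front (some v) hpw' hinv'
        refine ⟨?_, ?_, ?_⟩
        · intro p hp
          rcases H1 p hp with h | h
          · exact Or.inl h
          · exact Or.inr (List.mem_cons_of_mem _ h)
        · intro c hc
          rcases List.mem_cons.1 hc with rfl | hc'
          · exact ⟨p0, H3 p0 hp0f, hp0l c (List.mem_cons_self ..), by omega⟩
          · exact H2 c hc'
        · exact H3

-- B's candidate loop builds the flatMap of contributions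
lemma pvCand_eq (ca cb : Int) (front : List (Int × Int)) (p : Int × Int) :
    front.foldl (fun cand q =>
      let cand := if q.1 + p.1 < ca then cand ++ [(q.1 + p.1, q.2)] else cand
      if q.2 + p.2 < cb then cand ++ [(q.1, q.2 + p.2)] else cand) []
    = front.flatMap (pvContribs ca cb p) := by
  have hbody : ∀ (cand : List (Int × Int)) (q : Int × Int), q ∈ front →
      (let c := if q.1 + p.1 < ca then cand ++ [(q.1 + p.1, q.2)] else cand
       if q.2 + p.2 < cb then c ++ [(q.1, q.2 + p.2)] else c)
      = cand ++ pvContribs ca cb p q := by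
    intro cand q _
    unfold pvContribs
    rw [Int.add_comm q.1 p.1, Int.add_comm q.2 p.2]
    split_ifs <;> simp
  have h1 := PySem.List.foldl_congr_mem (l := front) (init := ([] : List (Int × Int)))
    (f := fun cand q =>
      let cand := if q.1 + p.1 < ca then cand ++ [(q.1 + p.1, q.2)] else cand
      if q.2 + p.2 < cb then cand ++ [(q.1, q.2 + p.2)] else cand)
    (g := fun cand q => cand ++ pvContribs ca cb p q)
    (fun acc x hx => hbody acc x hx)
  rw [h1, PySem.List.foldl_append_eq_flatMap]
  rfl

-- the frontier invariant: front is a subset of the full state list and dominates it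
def pvInvP (front S : List (Int × Int)) : Prop :=
  (∀ q ∈ front, q ∈ S) ∧ (∀ s ∈ S, ∃ q ∈ front, q.1 ≤ s.1 ∧ q.2 ≤ s.2)

lemma pvStepP (ca cb : Int) (p : Int × Int) (front S : List (Int × Int)) (h : pvInvP front S) :
    pvInvP (pvStepB ca cb front p) (S.flatMap (pvContribs ca cb p)) := by
  obtain ⟨hPS, hSP⟩ := h
  unfold pvStepB
  rw [pvCand_eq]
  set cand := front.flatMap (pvContribs ca cb p) with hcand
  set scand := PySem.List.sorted cand (fun s => s.1) with hscand
  have hpair : scand.Pairwise (fun x y => x.1 ≤ y.1) :=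
    PySem.List.sorted_pairwise cand (fun s => s.1)
  have hmem : ∀ x, x ∈ scand ↔ x ∈ cand :=
    fun x => PySem.List.mem_sorted cand (fun s => s.1) false x
  obtain ⟨H1, H2, _⟩ := pvScan_dom scand [] none hpair (by intro v hv; exact absurd hv (by simp))
  constructor
  · intro q hq
    rcases H1 q hq with h | h
    · exact absurd h (by simp)
    · rw [hmem] at h
      rw [hcand, List.mem_flatMap] at h
      obtain ⟨r, hr, hqr⟩ := h
      rw [List.mem_flatMap]
      exact ⟨r, hPS r hr, hqr⟩
  · intro s' hs'
    rw [List.mem_flatMap] at hs'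
    obtain ⟨s, hsS, hc⟩ := hs'
    obtain ⟨q, hqf, hq1, hq2⟩ := hSP s hsS
    rw [mem_pvContribs] at hc
    rcases hc with ⟨hlt, rfl⟩ | ⟨hlt, rfl⟩
    · -- branch A: q contributes (p.1 + q.1, q.2) ≤ (p.1 + s.1, s.2)
      have hcmem : ((p.1 + q.1, q.2) : Int × Int) ∈ scand := by
        rw [hmem, hcand, List.mem_flatMap]
        exact ⟨q, hqf, by rw [mem_pvContribs]; left; exact ⟨by omega, rfl⟩⟩
      obtain ⟨r, hrf, hr1, hr2⟩ := H2 _ hcmem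
      exact ⟨r, hrf, by simp at hr1 hr2 ⊢; omega, by simp at hr1 hr2 ⊢; omega⟩
    · -- branch B: q contributes (q.1, p.2 + q.2) ≤ (s.1, p.2 + s.2)
      have hcmem : ((q.1, p.2 + q.2) : Int × Int) ∈ scand := by
        rw [hmem, hcand, List.mem_flatMap]
        exact ⟨q, hqf, by rw [mem_pvContribs]; right; exact ⟨by omega, rfl⟩⟩
      obtain ⟨r, hrf, hr1, hr2⟩ := H2 _ hcmem
      exact ⟨r, hrf, by simp at hr1 hr2 ⊢; omega, by simp at hr1 hr2 ⊢; omega⟩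

lemma pvChainP (ca cb : Int) : ∀ (info : List (Int × Int)) (front S : List (Int × Int)),
    pvInvP front S → pvInvP (info.foldl (pvStepB ca cb) front) (pvGen ca cb info S) := by
  intro info
  induction info with
  | nil => intro front S h; exact h
  | cons p t ih =>
    intro front S h
    simp only [List.foldl]
    rw [pvGen_cons]
    exact ih _ _ (pvStepP ca cb p front S h)

lemma pvInvP_init : pvInvP [((0 : Int), (0 : Int))] [((0 : Int), (0 : Int))] :=
  ⟨fun _ hp => hp, fun s hs => ⟨s, hs, le_refl _, le_refl _⟩⟩

-- ===== A-side machinery (dict fold vs the plain state-list generator) =====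

-- the running min at key m, as an option fold
def pvR (m : Int) (o : Option Int) (l : List (Int × Int)) : Option Int :=
  l.foldl (fun o q => if q.1 = m then
      some (match o with | none => q.2 | some w => min w q.2) else o) o

-- values contributed at key m
def pvValsAt (m : Int) (l : List (Int × Int)) : List Int :=
  (l.filter (fun q => q.1 = m)).map (·.2)

lemma pvR_eq_minL : ∀ (l : List (Int × Int)) (m : Int) (o : Option Int),
    pvR m o l = pvMinL (o.toList ++ pvValsAt m l) := by
  intro l
  induction l with
  | nil => intro m o; cases o <;> simp [pvR, pvValsAt, pvMinL]
  | cons q t ih =>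
    intro m o
    by_cases hq : q.1 = m
    · cases o with
      | none =>
        simp only [pvR, List.foldl, hq, if_pos]
        have := ih m (some q.2)
        simp [pvR] at this
        rw [this]
        simp [pvValsAt, hq, pvMinL]
      | some w =>
        simp only [pvR, List.foldl, hq, if_pos]
        have := ih m (some (min w q.2))
        simp [pvR] at this
        rw [this]
        simp [pvValsAt, hq, pvMinL, List.foldl]
    · cases o with
      | none =>
        simp only [pvR, List.foldl, hq, if_false]
        have := ih m none
        simp [pvR] at this
        rw [this]
        simp [pvValsAt, hq]
      | some w =>
        simp only [pvR, List.foldl, hq, if_false]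
        have := ih m (some w)
        simp [pvR] at this
        rw [this]
        simp [pvValsAt, hq]

lemma pvMStep_get? (d : PySem.Dict Int Int) (q : Int × Int) (m : Int) :
    (pvMStep d q).get? m = if q.1 = m then
      some (match d.get? m with | none => q.2 | some w => min w q.2) else d.get? m := by
  unfold pvMStep
  rw [PySem.Dict.get?_insert]
  by_cases hq : q.1 = m
  · subst hq
    simp [PySem.Dict.getD_eq_get?_getD]
    cases d.get? q.1 <;> simp
  · rw [if_neg (fun h => hq h.symm), if_neg hq]

lemma pvFold_get? : ∀ (l : List (Int × Int)) (d : PySem.Dict Int Int) (m : Int),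
    (l.foldl pvMStep d).get? m = pvR m (d.get? m) l := by
  intro l
  induction l with
  | nil => intro d m; simp [pvR]
  | cons q t ih =>
    intro d m
    simp only [List.foldl]
    rw [ih, pvR, pvR, List.foldl, ← pvMStep_get? d q m]

lemma pvFold_nodup_keys : ∀ (l : List (Int × Int)) (d : PySem.Dict Int Int),
    d.keys.Nodup → (l.foldl pvMStep d).keys.Nodup := by
  intro l
  induction l with
  | nil => intro d h; exact h
  | cons q t ih =>
    intro d h
    exact ih _ (PySem.Dict.nodup_keys_insert _ _ _ h)

-- flatMap form of a foldl over per-element contribution lists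
lemma pvFoldl_flatMap {α β γ : Type} (g : β → List α) (f : γ → α → γ) :
    ∀ (l : List β) (init : γ),
    (l.flatMap g).foldl f init = l.foldl (fun acc x => (g x).foldl f acc) init := by
  intro l
  induction l with
  | nil => intro init; simp
  | cons x t ih => intro init; simp [List.flatMap_cons, List.foldl_append, ih]

-- A's inner body on one item equals folding pvMStep over the contributions
lemma pvInnerA_eq (ca cb : Int) (p : Int × Int) (ndp : PySem.Dict Int Int) (q : Int × Int) :
    (let ndp' := if p.1 + q.1 < ca then
        ndp.insert (p.1 + q.1) (min (ndp.getD (p.1 + q.1) q.2) q.2) else ndp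
     if p.2 + q.2 < cb then
        ndp'.insert q.1 (min (ndp'.getD q.1 (p.2 + q.2)) (p.2 + q.2)) else ndp')
    = (pvContribs ca cb p q).foldl pvMStep ndp := by
  unfold pvContribs pvMStep
  split_ifs <;> simp [List.foldl]

-- the invariant relating A's dict to the state list
def pvInv (dp : PySem.Dict Int Int) (S : List (Int × Int)) : Prop :=
  dp.keys.Nodup ∧
  (∀ k v, dp.get? k = some v → (k, v) ∈ S) ∧
  (∀ k v, (k, v) ∈ S → ∃ w, dp.get? k = some w ∧ w ≤ v)

lemma pvStep (ca cb : Int) (p : Int × Int) (dp : PySem.Dict Int Int) (S : List (Int × Int))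
    (h : pvInv dp S) :
    pvInv ((dp.items.flatMap (pvContribs ca cb p)).foldl pvMStep PySem.Dict.empty)
          (S.flatMap (pvContribs ca cb p)) := by
  obtain ⟨hnd, hAB, hBA⟩ := h
  set l := dp.items.flatMap (pvContribs ca cb p) with hl
  have hget : ∀ m, ((l.foldl pvMStep PySem.Dict.empty).get? m) = pvMinL (pvValsAt m l) := by
    intro m
    rw [pvFold_get?, pvR_eq_minL]
    simp [PySem.Dict.get?_empty]
  have hvals : ∀ m c, c ∈ pvValsAt m l ↔ ∃ q ∈ dp.items, (m, c) ∈ pvContribs ca cb p q := by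
    intro m c
    simp only [pvValsAt, List.mem_map, List.mem_filter, hl, List.mem_flatMap]
    constructor
    · rintro ⟨⟨m', c'⟩, ⟨⟨q, hq, hmem⟩, heq⟩, rfl⟩
      simp at heq
      subst heq
      exact ⟨q, hq, hmem⟩
    · rintro ⟨q, hq, hmem⟩
      exact ⟨(m, c), ⟨⟨q, hq, hmem⟩, by simp⟩, rfl⟩
  refine ⟨pvFold_nodup_keys _ _ (by simp [PySem.Dict.keys_empty]), ?_, ?_⟩
  · -- every dict entry is a reachable state
    intro m μ hm
    rw [hget] at hm
    have hmem := pvMinL_mem hm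
    rw [hvals] at hmem
    obtain ⟨q, hq, hc⟩ := hmem
    have : dp.get? q.1 = some q.2 := PySem.Dict.get?_of_mem_items dp (by simpa using hq) hnd
    have hqS : (q.1, q.2) ∈ S := hAB _ _ this
    rw [List.mem_flatMap]
    exact ⟨(q.1, q.2), hqS, by simpa using hc⟩
  · -- every reachable state is dominated by a dict entry
    intro m y hy
    rw [List.mem_flatMap] at hy
    obtain ⟨⟨k, v⟩, hqS, hc⟩ := hy
    obtain ⟨w, hw, hwv⟩ := hBA k v hqS
    have hkw : (k, w) ∈ dp.items := PySem.Dict.mem_items_of_get?_eq_some _ hw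
    rw [mem_pvContribs] at hc
    rcases hc with ⟨hlt, heq⟩ | ⟨hlt, heq⟩
    · -- assigned to A: contribution (p.1 + k, v)
      simp at heq
      obtain ⟨hm, hyv⟩ := heq
      have hin : w ∈ pvValsAt m l := by
        rw [hvals]
        exact ⟨(k, w), hkw, by rw [mem_pvContribs]; left; simp [hm]; omega⟩
      obtain ⟨c, cs, hcs⟩ : ∃ c cs, pvValsAt m l = c :: cs := by
        cases hls : pvValsAt m l with
        | nil => rw [hls] at hin; simp at hin
        | cons c cs => exact ⟨c, cs, rfl⟩
      refine ⟨(pvMinL (pvValsAt m l)).getD 0, ?_, ?_⟩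
      · rw [hget, hcs]; simp [pvMinL]
      · have hle := pvMinL_le (xs := pvValsAt m l) (μ := (pvMinL (pvValsAt m l)).getD 0)
          (by rw [hcs]; simp [pvMinL]) w hin
        omega
    · -- assigned to B: contribution (k, p.2 + v)
      simp at heq
      obtain ⟨hm, hyv⟩ := heq
      have hin : p.2 + w ∈ pvValsAt m l := by
        rw [hvals]
        refine ⟨(k, w), hkw, by rw [mem_pvContribs]; right; simp [hm]; omega⟩
      obtain ⟨c, cs, hcs⟩ : ∃ c cs, pvValsAt m l = c :: cs := by
        cases hls : pvValsAt m l with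
        | nil => rw [hls] at hin; simp at hin
        | cons c cs => exact ⟨c, cs, rfl⟩
      refine ⟨(pvMinL (pvValsAt m l)).getD 0, ?_, ?_⟩
      · rw [hget, hcs]; simp [pvMinL]
      · have hle := pvMinL_le (xs := pvValsAt m l) (μ := (pvMinL (pvValsAt m l)).getD 0)
          (by rw [hcs]; simp [pvMinL]) (p.2 + w) hin
        omega

lemma pvFoldl_congr {α β : Type} (l : List α) (f g : β → α → β) (init : β)
    (h : ∀ acc x, x ∈ l → f acc x = g acc x) : l.foldl f init = l.foldl g init := by
  induction l generalizing init with
  | nil => rfl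
  | cons x t ih =>
    simp only [List.foldl]
    rw [h init x (by simp)]
    exact ih _ (fun acc y hy => h acc y (List.mem_cons_of_mem _ hy))

-- A's per-item loop body, named
def pvFA (ca cb : Int) (dp : PySem.Dict Int Int) (p : Int × Int) : PySem.Dict Int Int :=
  dp.items.foldl (fun ndp q =>
    let ndp := if p.1 + q.1 < ca then
        ndp.insert (p.1 + q.1) (min (ndp.getD (p.1 + q.1) q.2) q.2) else ndp
    if p.2 + q.2 < cb then
        ndp.insert q.1 (min (ndp.getD q.1 (p.2 + q.2)) (p.2 + q.2)) else ndp)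
    PySem.Dict.empty

lemma pvFA_eq (ca cb : Int) (dp : PySem.Dict Int Int) (p : Int × Int) :
    pvFA ca cb dp p = (dp.items.flatMap (pvContribs ca cb p)).foldl pvMStep PySem.Dict.empty := by
  unfold pvFA
  rw [pvFoldl_flatMap]
  exact pvFoldl_congr _ _ _ _ (fun acc x _ => by rw [← pvInnerA_eq])

lemma pvChain (ca cb : Int) : ∀ (info : List (Int × Int)) (dp : PySem.Dict Int Int)
    (S : List (Int × Int)), pvInv dp S →
    pvInv (info.foldl (pvFA ca cb) dp) (pvGen ca cb info S) := by
  intro info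
  induction info with
  | nil => intro dp S h; exact h
  | cons p t ih =>
    intro dp S h
    simp only [List.foldl]
    rw [pvGen_cons]
    apply ih
    rw [pvFA_eq]
    exact pvStep ca cb p dp S h

lemma pvInv_init : pvInv (PySem.Dict.ofList [((0 : Int), (0 : Int))]) [((0 : Int), (0 : Int))] := by
  have hof : PySem.Dict.ofList [((0 : Int), (0 : Int))] = PySem.Dict.mk [((0 : Int), (0 : Int))] := by
    decide
  refine ⟨by decide, ?_, ?_⟩
  · intro k v h
    rw [hof, PySem.Dict.get?_mk_cons] at h
    by_cases hk : (0 : Int) = k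
    · rw [if_pos (by simpa using hk)] at h
      simp at h
      simp [← hk, ← h]
    · rw [if_neg (by simpa using hk)] at h
      simp [PySem.Dict.get?, List.find?] at h
  · intro k v h
    simp at h
    obtain ⟨rfl, rfl⟩ := h
    exact ⟨0, by decide, le_refl 0⟩

-- keys of dp and first components of S have the same members, under pvInv
lemma pvInv_keys {dp : PySem.Dict Int Int} {S : List (Int × Int)} (h : pvInv dp S) :
    ∀ m, m ∈ dp.keys ↔ m ∈ S.map Prod.fst := by
  obtain ⟨hnd, hAB, hBA⟩ := h
  intro m
  constructor
  · intro hm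
    obtain ⟨v, hv⟩ : ∃ v, dp.get? m = some v := by
      cases hg : dp.get? m with
      | none => exact absurd hm ((PySem.Dict.get?_eq_none_iff_not_mem_keys _ _).1 hg)
      | some v => exact ⟨v, rfl⟩
    exact List.mem_map.2 ⟨(m, v), hAB _ _ hv, rfl⟩
  · intro hm
    obtain ⟨⟨k, v⟩, hin, rfl⟩ := List.mem_map.1 hm
    obtain ⟨w, hw, _⟩ := hBA _ _ hin
    by_contra hnot
    rw [(PySem.Dict.get?_eq_none_iff_not_mem_keys _ _).2 hnot] at hw
    simp at hw

lemma pvMin?_eq_minL (xs : List Int) : PySem.List.min? xs (fun x => x) = pvMinL xs := by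
  cases xs with
  | nil => simp [pvMinL, PySem.List.min?_eq_none_iff]
  | cons c cs => rw [PySem.List.min?_id_cons]; rfl

-- min over fst is unchanged by dominance pruning
lemma pvMinL_of_invP (front S : List (Int × Int)) (h : pvInvP front S) :
    pvMinL (front.map Prod.fst) = pvMinL (S.map Prod.fst) := by
  obtain ⟨h1, h2⟩ := h
  rcases hx : pvMinL (front.map Prod.fst) with _ | μ <;> rcases hy : pvMinL (S.map Prod.fst) with _ | ν
  · rfl
  · have hf : front = [] := List.map_eq_nil_iff.1 (pvMinL_eq_none.1 hx)
    subst hf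
    obtain ⟨s, hsS, rfl⟩ := List.mem_map.1 (pvMinL_mem hy)
    obtain ⟨p, hp, _⟩ := h2 s hsS
    exact absurd hp (by simp)
  · have hSe : S = [] := List.map_eq_nil_iff.1 (pvMinL_eq_none.1 hy)
    subst hSe
    obtain ⟨p, hpf, rfl⟩ := List.mem_map.1 (pvMinL_mem hx)
    exact absurd (h1 p hpf) (by simp)
  · congr 1
    obtain ⟨q, hqf, hq⟩ := List.mem_map.1 (pvMinL_mem hx)
    obtain ⟨s, hsS, hs⟩ := List.mem_map.1 (pvMinL_mem hy)
    have hνμ : ν ≤ q.1 := pvMinL_le hy q.1 (List.mem_map.2 ⟨q, h1 q hqf, rfl⟩)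
    obtain ⟨p, hpf, hp1, _⟩ := h2 s hsS
    have hμp : μ ≤ p.1 := pvMinL_le hx p.1 (List.mem_map.2 ⟨p, hpf, rfl⟩)
    omega

-- ===== VERDICT (by name: the statement is the Claim_ definition above) =====
theorem answer_spec : Claim_equal_answer := by
  intro info ca cb _
  unfold Spec_answer answer answer_alt
  -- A side: the dict's keys are exactly the reachable A-sums
  have hinv := pvChain ca cb info _ _ pvInv_init
  have hkeys := pvInv_keys hinv
  have hminA : pvMinL (info.foldl (pvFA ca cb) (PySem.Dict.ofList [(0, 0)])).keys
      = pvMinL ((pvGen ca cb info [(0, 0)]).map Prod.fst) := pvMinL_congr hkeys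
  -- B side: the pruned frontier preserves the minimal reachable A-sum
  have hinvP := pvChainP ca cb info [(0, 0)] [(0, 0)] pvInvP_init
  have hminB : pvMinL ((info.foldl (pvStepB ca cb) [(0, 0)]).map Prod.fst)
      = pvMinL ((pvGen ca cb info [(0, 0)]).map Prod.fst) := pvMinL_of_invP _ _ hinvP
  show (if (info.foldl (pvFA ca cb) (PySem.Dict.ofList [(0, 0)])).size ≠ 0 then
      (PySem.List.min? (info.foldl (pvFA ca cb) (PySem.Dict.ofList [(0, 0)])).keys (fun x => x)).getD (-1)
    else -1)
    = (PySem.List.min? ((info.foldl (pvStepB ca cb) [(0, 0)]).map Prod.fst) (fun x => x)).getD (-1)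
  rw [pvMin?_eq_minL, pvMin?_eq_minL, hminB, ← hminA]
  set dp := info.foldl (pvFA ca cb) (PySem.Dict.ofList [(0, 0)]) with hdp
  by_cases hsz : dp.size = 0
  · have hk : dp.keys = [] := by
      have : dp.items = [] := List.length_eq_zero_iff.1 hsz
      simp [PySem.Dict.keys, this]
    simp [hsz, hk, pvMinL]
  · have hk : ∃ c cs, dp.keys = c :: cs := by
      cases hls : dp.keys with
      | nil =>
        exfalso
        apply hsz
        have : dp.items.map Prod.fst = [] := hls
        simpa [PySem.Dict.size] using congrArg List.length this
      | cons c cs => exact ⟨c, cs, rfl⟩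
    obtain ⟨c, cs, hcs⟩ := hk
    simp [hsz, hcs, pvMinL]
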